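-- pv_equiv track=rewrite | github.com/stephenxie990-blip/invest-evolution | src/invest_evolution/application/training/review_contracts/__init__.py | latest_runtime_config_mutation_event
-- ===== SOURCE A (Python) =====
-- from typing import Any, NotRequired, TypeAlias, TypedDict, cast
--
-- def latest_runtime_config_mutation_event(
--     optimization_events: list[dict[str, Any]] | None = None,
-- ) -> dict[str, Any]:
--     for event in reversed(list(optimization_events or [])):
--         if str(event.get("stage") or "") in {
--             "runtime_config_mutation",
--             "runtime_config_mutation_skipped",
--         }:
--             return dict(event)
--     return {}
-- ===== SOURCE B (Python) =====
-- def latest_runtime_config_mutation_event(optimization_events=None):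
--     latest = None
--     for event in (optimization_events or []):
--         if str(event.get("stage") or "") in {
--             "runtime_config_mutation",
--             "runtime_config_mutation_skipped",
--         }:
--             latest = event
--     return dict(latest) if latest is not None else {}
-- ===== Notes on version B (the rewrite author's own statement) =====
-- stated objective: alternative
-- what changed: Replaces the reversed-list scan with early return by a single forward pass keeping a 'latest matching event' accumulator that the last match overwrites.
import Mathlib
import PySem

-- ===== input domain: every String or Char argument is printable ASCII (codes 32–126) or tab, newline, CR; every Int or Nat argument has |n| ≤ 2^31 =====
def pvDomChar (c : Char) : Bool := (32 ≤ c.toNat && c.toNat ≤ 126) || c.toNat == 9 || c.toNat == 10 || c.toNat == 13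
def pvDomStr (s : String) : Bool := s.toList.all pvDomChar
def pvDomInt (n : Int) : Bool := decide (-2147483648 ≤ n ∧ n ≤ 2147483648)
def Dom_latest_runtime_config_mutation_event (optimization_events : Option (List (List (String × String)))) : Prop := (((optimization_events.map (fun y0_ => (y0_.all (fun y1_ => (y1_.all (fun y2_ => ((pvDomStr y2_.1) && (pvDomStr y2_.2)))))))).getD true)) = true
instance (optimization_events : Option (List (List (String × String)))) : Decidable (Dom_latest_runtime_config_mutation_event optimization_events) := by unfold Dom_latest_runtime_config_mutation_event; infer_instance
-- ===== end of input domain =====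

-- B replaces A's reversed scan with early return by a forward pass keeping a
-- 'latest match' accumulator; equivalence of the two is proved below.

-- ===== PORT A =====
-- event.get("stage"): first match in the association list (the dict); `or ""` maps None/"" to ""
def pvStageA (event : List (String × String)) : String :=
  ((PySem.Dict.mk event).get? "stage").getD ""

def pvIsMutA (event : List (String × String)) : Bool :=
  pvStageA event == "runtime_config_mutation" || pvStageA event == "runtime_config_mutation_skipped"

-- the `for event in reversed(...)` loop with early `return dict(event)`, else `return {}`
def pvLoopA : List (List (String × String)) → List (String × String)
  | [] => []
  | event :: rest => if pvIsMutA event then event else pvLoopA rest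

def latest_runtime_config_mutation_event (optimization_events : Option (List (List (String × String)))) : List (String × String) :=
  pvLoopA (optimization_events.getD []).reverse

-- ===== PORT B =====
def pvStageB (event : List (String × String)) : String :=
  ((PySem.Dict.mk event).get? "stage").getD ""

def pvIsMutB (event : List (String × String)) : Bool :=
  pvStageB event == "runtime_config_mutation" || pvStageB event == "runtime_config_mutation_skipped"

-- forward fold: `latest = event` whenever the stage matches (last match wins)
def latest_runtime_config_mutation_event_alt (optimization_events : Option (List (List (String × String)))) : List (String × String) :=
  let latest := (optimization_events.getD []).foldl
    (fun latest event => if pvIsMutB event then some event else latest)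
    (none : Option (List (String × String)))
  match latest with
  | some event => event
  | none => []

-- ===== PRECONDITION & SPEC =====
def Spec_latest_runtime_config_mutation_event (optimization_events : Option (List (List (String × String)))) (out : List (String × String)) : Prop := out = latest_runtime_config_mutation_event_alt optimization_events
instance (optimization_events : Option (List (List (String × String)))) (out : List (String × String)) : Decidable (Spec_latest_runtime_config_mutation_event optimization_events out) := by unfold Spec_latest_runtime_config_mutation_event; infer_instance

-- ===== CLAIM (what is proved, stated in full; the proofs are below) =====
def Claim_equal_latest_runtime_config_mutation_event : Prop := ∀ (optimization_events : Option (List (List (String × String)))), Dom_latest_runtime_config_mutation_event optimization_events → Spec_latest_runtime_config_mutation_event optimization_events (latest_runtime_config_mutation_event optimization_events)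

-- ===== LEMMAS AND PROOFS =====

-- first match scanning left-to-right, as an Option
def pvFindOpt : List (List (String × String)) → Option (List (String × String))
  | [] => none
  | event :: rest => if pvIsMutA event then some event else pvFindOpt rest

theorem pvFindOpt_append (a b : List (List (String × String))) :
    pvFindOpt (a ++ b) = (pvFindOpt a).or (pvFindOpt b) := by
  induction a with
  | nil => simp [pvFindOpt]
  | cons e r ih =>
    simp only [List.cons_append, pvFindOpt, ih]
    split <;> simp

theorem pvLoopA_eq_findOpt (l : List (List (String × String))) :
    pvLoopA l = (pvFindOpt l).getD [] := by
  induction l with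
  | nil => rfl
  | cons e r ih =>
    simp only [pvLoopA, pvFindOpt]
    split <;> simp [ih]

theorem pvFoldB_eq (l : List (List (String × String))) (acc : Option (List (String × String))) :
    l.foldl (fun latest event => if pvIsMutB event then some event else latest) acc
      = (pvFindOpt l.reverse).or acc := by
  induction l generalizing acc with
  | nil => simp [pvFindOpt]
  | cons e r ih =>
    simp only [List.foldl_cons, ih, List.reverse_cons, pvFindOpt_append]
    have hB : pvIsMutB e = pvIsMutA e := rfl
    by_cases h : pvIsMutA e = true <;>
      simp [pvFindOpt, hB, h]

-- ===== VERDICT (by name: the statement is the Claim_ definition above) =====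
theorem latest_runtime_config_mutation_event_spec : Claim_equal_latest_runtime_config_mutation_event := by
  intro oe _
  show latest_runtime_config_mutation_event oe = latest_runtime_config_mutation_event_alt oe
  simp only [latest_runtime_config_mutation_event, latest_runtime_config_mutation_event_alt,
    pvFoldB_eq, pvLoopA_eq_findOpt, Option.or_none]
  cases pvFindOpt (oe.getD []).reverse <;> rfl
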